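-- pv_equiv track=rewrite | github.com/mbeavitt/trash-py | src/trash_py/arrays.py | _consensus_N
-- ===== SOURCE A (Python) =====
-- def _consensus_N(alignment: list[str], N: int) -> str:
--     if not alignment or N <= 0:
--         return ""
--     ncol = len(alignment[0])
--     frequencies = [sum(1 for s in alignment if s[c] != "-") for c in range(ncol)]
--     order = sorted(range(ncol), key=lambda c: (-frequencies[c], c))
--     top_cols = set(order[:N])
--
--     bases = ("g", "c", "t", "a")
--     result: list[str] = []
--     for c in range(ncol):
--         if c not in top_cols:
--             continue
--         col = [s[c] for s in alignment]
--         counts = [col.count(b) for b in bases]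
--         best = 0
--         best_c = counts[0]
--         for k in range(1, 4):
--             if counts[k] > best_c:
--                 best = k
--                 best_c = counts[k]
--         result.append(bases[best])
--     return "".join(result)
-- ===== SOURCE B (Python) =====
-- def _consensus_N(alignment: list[str], N: int) -> str:
--     if not alignment or N <= 0:
--         return ""
--     ncol = len(alignment[0])
--     freq = [sum(s[c] != "-" for s in alignment) for c in range(ncol)]
--     out = []
--     for c in range(ncol):
--         # rank of column c under the order (-freq, index): selected iff rank < N.
--         rank = sum(f > freq[c] or (f == freq[c] and d < c) for d, f in enumerate(freq))
--         if rank < N: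
--             _, _, b = min((-sum(s[c] == b for s in alignment), i, b)
--                           for i, b in enumerate("gcta"))
--             out.append(b)
--     return "".join(out)
-- ===== Notes on version B (the rewrite author's own statement) =====
-- stated objective: alternative
-- what changed: Replaces A's sort-then-slice top-N selection (sorted(range(ncol), key=(-freq,c)) plus a set of the first N) by direct rank counting -- a column is emitted iff fewer than N columns precede it under (-freq, index) -- and replaces A's explicit index/argmax loop over the four base counts by min over (-count, index, base) tuples.
import Mathlib
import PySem

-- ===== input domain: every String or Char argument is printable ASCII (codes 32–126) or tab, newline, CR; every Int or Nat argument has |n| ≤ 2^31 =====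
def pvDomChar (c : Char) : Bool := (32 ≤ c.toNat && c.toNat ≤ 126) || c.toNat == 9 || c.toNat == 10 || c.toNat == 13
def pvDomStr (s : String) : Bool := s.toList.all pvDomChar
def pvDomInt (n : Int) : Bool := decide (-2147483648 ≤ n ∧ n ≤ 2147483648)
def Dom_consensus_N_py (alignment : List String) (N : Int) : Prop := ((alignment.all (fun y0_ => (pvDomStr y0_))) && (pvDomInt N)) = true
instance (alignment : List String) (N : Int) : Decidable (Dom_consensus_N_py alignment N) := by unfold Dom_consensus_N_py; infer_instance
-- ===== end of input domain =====

-- B selects the top-N columns by counting each column's rank under (-coverage, index) instead of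
-- A's sort-then-slice-then-set, and picks the consensus base as the minimum of (-count, index, base)
-- tuples instead of A's explicit index/argmax loop; an alternative algorithm, same results.

-- ===== PORT A =====
-- s[c] (an out-of-range index raises in Python; such inputs are excluded by Pre_)
def pvChA (s : String) (c : Int) : Char := (PySem.Str.pyGet? s c).getD '?'

-- frequencies[c] = sum(1 for s in alignment if s[c] != "-")
def pvFreqA (alignment : List String) (c : Int) : Int :=
  alignment.foldl (fun acc s => if pvChA s c ≠ '-' then acc + 1 else acc) 0

def consensus_N_py (alignment : List String) (N : Int) : String :=
  if alignment = [] ∨ N ≤ 0 then "" else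
  let ncol : Int := PySem.Str.len (alignment.headD "")
  let frequencies : List Int := (PySem.List.pyRange 0 ncol 1).map (fun c => pvFreqA alignment c)
  let order := PySem.List.sorted2 (PySem.List.pyRange 0 ncol 1)
      (fun c => -(PySem.List.pyGetD frequencies c 0)) (fun c => c)
  let top_cols := PySem.Set.ofList (PySem.List.slice order none (some N))
  let result : List Char := (PySem.List.pyRange 0 ncol 1).foldl (fun res c =>
      if ¬ (PySem.Set.contains top_cols c) then res else
      let col : List Char := alignment.map (fun s => pvChA s c)
      let counts : List Int := ['g', 'c', 't', 'a'].map (fun b => (col.count b : Int))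
      let st : Int × Int := (PySem.List.pyRange 1 4 1).foldl (fun st k =>
          if PySem.List.pyGetD counts k 0 > st.2 then (k, PySem.List.pyGetD counts k 0) else st)
          ((0 : Int), PySem.List.pyGetD counts 0 0)
      res ++ [PySem.List.pyGetD ['g', 'c', 't', 'a'] st.1 '?']) []
  String.ofList result

-- ===== PORT B =====
-- s[c], as in Source B's comprehensions
def pvChB (s : String) (c : Int) : Char := (PySem.Str.pyGet? s c).getD '?'

-- sum(s[c] != "-" for s in alignment)
def pvFreqB (alignment : List String) (c : Int) : Int :=
  alignment.foldl (fun acc s => acc + (if pvChB s c ≠ '-' then 1 else 0)) 0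

-- sum(s[c] == b for s in alignment)
def pvCntB (alignment : List String) (c : Int) (b : Char) : Int :=
  alignment.foldl (fun acc s => acc + (if pvChB s c = b then 1 else 0)) 0

-- Python's tuple '<' on the (int, int, str) triples B minimises, hand-ported lexicographically;
-- exact here: the third components are single ASCII characters, where Char '<' is Python's str '<'
def pvLex3 (x y : Int × Int × Char) : Bool :=
  decide (x.1 < y.1) || (decide (x.1 = y.1) &&
    (decide (x.2.1 < y.2.1) || (decide (x.2.1 = y.2.1) && decide (x.2.2 < y.2.2))))

-- min(...) over a nonempty sequence of triples: Python's min keeps the first minimum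
def pvMin3 (x : Int × Int × Char) (rest : List (Int × Int × Char)) : Int × Int × Char :=
  rest.foldl (fun best y => if pvLex3 y best then y else best) x

def consensus_N_py_alt (alignment : List String) (N : Int) : String :=
  if alignment = [] ∨ N ≤ 0 then "" else
  let ncol : Int := PySem.Str.len (alignment.headD "")
  let freq : List Int := (PySem.List.pyRange 0 ncol 1).map (fun c => pvFreqB alignment c)
  let out : List Char := (PySem.List.pyRange 0 ncol 1).foldl (fun res c =>
      let rank : Int := (PySem.List.enumerate freq).foldl (fun acc df =>
          acc + (if PySem.List.pyGetD freq c 0 < df.2 ∨ (df.2 = PySem.List.pyGetD freq c 0 ∧ df.1 < c)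
                 then 1 else 0)) 0
      if rank < N then
        match (PySem.List.enumerate ['g', 'c', 't', 'a']).map
            (fun ib => (-(pvCntB alignment c ib.2), ib.1, ib.2)) with
        | [] => res
        | x :: rest => res ++ [(pvMin3 x rest).2.2]
      else res) []
  String.ofList out

-- ===== PRECONDITION & SPEC =====
-- Pre_ excludes exactly the inputs on which Python A raises IndexError: some string shorter than
-- alignment[0] while the early-"" exit is not taken (B raises there too).
def Pre_consensus_N_py (alignment : List String) (N : Int) : Prop :=
  alignment = [] ∨ N ≤ 0 ∨ ∀ s ∈ alignment, PySem.Str.len (alignment.headD "") ≤ PySem.Str.len s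
instance (alignment : List String) (N : Int) : Decidable (Pre_consensus_N_py alignment N) := by
  unfold Pre_consensus_N_py; infer_instance

def pvWitness_consensus_N_py : List String × Int := (["gc-a", "gcta", "acta"], 2)

def Spec_consensus_N_py (alignment : List String) (N : Int) (out : String) : Prop := out = consensus_N_py_alt alignment N
instance (alignment : List String) (N : Int) (out : String) : Decidable (Spec_consensus_N_py alignment N out) := by unfold Spec_consensus_N_py; infer_instance

-- ===== CLAIM (what is proved, stated in full; the proofs are below) =====
def Claim_equal_consensus_N_py : Prop := ∀ (alignment : List String) (N : Int), Dom_consensus_N_py alignment N → Pre_consensus_N_py alignment N → Spec_consensus_N_py alignment N (consensus_N_py alignment N)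

-- ===== LEMMAS AND PROOFS =====

-- B's boolean sum is A's conditional count (both are the non-gap count of column c).
theorem pvFreqB_eq (alignment : List String) (c : Int) :
    pvFreqB alignment c = pvFreqA alignment c := by
  unfold pvFreqB pvFreqA pvChB pvChA
  rw [PySem.List.foldl_ite_add_one]
  induction alignment with
  | nil => simp
  | cons s t ih =>
    simp only [List.foldl_cons, List.countP_cons]
    rw [PySem.List.foldl_add (g := fun s => if (PySem.Str.pyGet? s c).getD '?' ≠ '-' then (1 : Int) else 0)] at *
    split_ifs with h <;> simp_all
    omega

-- B's boolean sum for base b is the count of b in the column A materialises.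
theorem pvCntB_eq (alignment : List String) (c : Int) (b : Char) :
    pvCntB alignment c b = ((alignment.map (fun s => pvChA s c)).count b : Int) := by
  unfold pvCntB
  rw [PySem.List.foldl_add (g := fun s => if pvChB s c = b then (1 : Int) else 0)]
  have hBA : pvChB = pvChA := rfl
  rw [hBA]
  induction alignment with
  | nil => simp
  | cons s t ih =>
    simp only [List.map_cons, List.sum_cons, List.count_cons]
    by_cases hsb : pvChA s c = b
    · simp only [hsb, beq_self_eq_true, if_pos]
      push_cast
      omega
    · have hne : ¬ (pvChA s c == b) = true := by simp [hsb]
      simp only [if_neg hsb, hne, Bool.false_eq_true, reduceIte]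
      omega

-- the four-way comparison with explicit count values
theorem pvPick4' (kg kc kt ka : Int) :
    PySem.List.pyGetD ['g', 'c', 't', 'a']
      ((PySem.List.pyRange 1 4 1).foldl
        (fun st k => if PySem.List.pyGetD [kg, kc, kt, ka] k 0 > st.2
          then (k, PySem.List.pyGetD [kg, kc, kt, ka] k 0) else st)
        ((0 : Int), PySem.List.pyGetD [kg, kc, kt, ka] 0 0)).1 '?'
    = (pvMin3 (-kg, 0, 'g') [(-kc, 1, 'c'), (-kt, 2, 't'), (-ka, 3, 'a')]).2.2 := by
  have hr : PySem.List.pyRange 1 4 1 = [1, 2, 3] := by decide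
  have e0 : PySem.List.pyGetD [kg, kc, kt, ka] (0 : Int) 0 = kg := rfl
  have e1 : PySem.List.pyGetD [kg, kc, kt, ka] (1 : Int) 0 = kc := rfl
  have e2 : PySem.List.pyGetD [kg, kc, kt, ka] (2 : Int) 0 = kt := rfl
  have e3 : PySem.List.pyGetD [kg, kc, kt, ka] (3 : Int) 0 = ka := rfl
  have c0 : PySem.List.pyGetD ['g', 'c', 't', 'a'] (0 : Int) '?' = 'g' := rfl
  have c1 : PySem.List.pyGetD ['g', 'c', 't', 'a'] (1 : Int) '?' = 'c' := rfl
  have c2 : PySem.List.pyGetD ['g', 'c', 't', 'a'] (2 : Int) '?' = 't' := rfl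
  have c3 : PySem.List.pyGetD ['g', 'c', 't', 'a'] (3 : Int) '?' = 'a' := rfl
  rw [hr]
  simp only [List.foldl, e0, e1, e2, e3, pvMin3, pvLex3]
  norm_num
  split_ifs <;> simp_all [c0, c1, c2, c3] <;> omega

-- A's explicit index/argmax loop over the four counts equals B's min of (-count, index, base) triples.
theorem pvPick4 (f : Char → Int) :
    PySem.List.pyGetD ['g', 'c', 't', 'a']
      ((PySem.List.pyRange 1 4 1).foldl
        (fun st k => if PySem.List.pyGetD (['g', 'c', 't', 'a'].map f) k 0 > st.2
          then (k, PySem.List.pyGetD (['g', 'c', 't', 'a'].map f) k 0) else st)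
        ((0 : Int), PySem.List.pyGetD (['g', 'c', 't', 'a'].map f) 0 0)).1 '?'
    = (pvMin3 (-(f 'g'), 0, 'g') [(-(f 'c'), 1, 'c'), (-(f 't'), 2, 't'), (-(f 'a'), 3, 'a')]).2.2 :=
  pvPick4' (f 'g') (f 'c') (f 't') (f 'a')

-- insertion with two comparators that agree where they are consulted
theorem pvInsertBy_congr {b1 b2 : Int → Int → Bool} (x : Int) (l : List Int)
    (h : ∀ y ∈ l, b1 x y = b2 x y) :
    PySem.List.insertBy b1 x l = PySem.List.insertBy b2 x l := by
  induction l with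
  | nil => rfl
  | cons y ys ih =>
    have hxy : b1 x y = b2 x y := h y (by simp)
    simp only [PySem.List.insertBy]
    rw [hxy]
    split
    · rfl
    · rw [ih (fun z hz => h z (List.mem_cons_of_mem _ hz))]

theorem pvFoldlInsertBy_congr {b1 b2 : Int → Int → Bool} (S : List Int)
    (h : ∀ a ∈ S, ∀ b ∈ S, b1 a b = b2 a b) :
    ∀ (xs acc : List Int), (∀ x ∈ xs, x ∈ S) → (∀ x ∈ acc, x ∈ S) →
      xs.foldl (fun acc x => PySem.List.insertBy b1 x acc) acc
        = xs.foldl (fun acc x => PySem.List.insertBy b2 x acc) acc := by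
  intro xs
  induction xs with
  | nil => intro acc _ _; rfl
  | cons x t ih =>
    intro acc hxs hacc
    have hx : x ∈ S := hxs x (by simp)
    simp only [List.foldl_cons]
    rw [pvInsertBy_congr x acc (fun y hy => h x hx y (hacc y hy))]
    exact ih _ (fun z hz => hxs z (List.mem_cons_of_mem _ hz))
      (fun z hz => by
        rcases (PySem.List.mem_insertBy b2 x z acc).1 hz with h1 | h1
        · exact h1 ▸ hx
        · exact hacc z h1)

-- A's two-key sort is the single-key sort whenever the comparators agree on the sorted list
theorem pvSorted2_eq (K : Int) (k1 key : Int → Int)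
    (h : ∀ a ∈ PySem.List.pyRange 0 K 1, ∀ b ∈ PySem.List.pyRange 0 K 1,
      (decide (k1 a < k1 b) || (!decide (k1 b < k1 a) && decide (a < b))) = decide (key a < key b)) :
    PySem.List.sorted2 (PySem.List.pyRange 0 K 1) k1 (fun c => c)
      = PySem.List.sorted (PySem.List.pyRange 0 K 1) key := by
  unfold PySem.List.sorted2 PySem.List.sorted
  simp only [Bool.false_eq_true, if_false]
  exact pvFoldlInsertBy_congr (PySem.List.pyRange 0 K 1) h _ [] (fun x hx => hx) (by simp)

-- membership in the first M elements of a strictly key-increasing list is a rank count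
theorem pvTakeMem (key : Int → Int) :
    ∀ (l : List Int), l.Pairwise (fun a b => key a < key b) → ∀ c ∈ l, ∀ M : Nat,
      (c ∈ l.take M ↔ l.countP (fun d => decide (key d < key c)) < M) := by
  intro l
  induction l with
  | nil => intro _ c hc; cases hc
  | cons a t ih =>
    intro hpw c hc M
    have hhead : ∀ d ∈ t, key a < key d := fun d hd => List.rel_of_pairwise_cons hpw hd
    have htail := hpw.of_cons
    by_cases hca : c = a
    · have h0 : (a :: t).countP (fun d => decide (key d < key c)) = 0 := by
        rw [List.countP_eq_zero]
        intro d hd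
        simp only [decide_eq_true_eq]
        rcases List.mem_cons.1 hd with h | h
        · subst h; rw [hca]; exact lt_irrefl _
        · rw [hca]; exact not_lt_of_gt (hhead d h)
      rw [h0]
      cases M with
      | zero => simp
      | succ M' => simp [hca, List.take_succ_cons]
    · have hct : c ∈ t := by rcases List.mem_cons.1 hc with h | h; exact absurd h hca; exact h
      have hac : key a < key c := hhead c hct
      have hcnt : (a :: t).countP (fun d => decide (key d < key c))
          = t.countP (fun d => decide (key d < key c)) + 1 := by
        rw [List.countP_cons]
        simp [hac]
      cases M with
      | zero => simp [hcnt]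
      | succ M' =>
        rw [List.take_succ_cons, hcnt]
        constructor
        · intro hm
          rcases List.mem_cons.1 hm with h | h
          · exact absurd h hca
          · have := (ih htail c hct M').1 h
            omega
        · intro hm
          exact List.mem_cons_of_mem _ ((ih htail c hct M').2 (by omega))

-- the linearised key agrees with the lexicographic order (-F, index) inside [0, K)
theorem pvLexKey (K Fa Fb a b : Int) (ha0 : 0 ≤ a) (haK : a < K) (hb0 : 0 ≤ b) (hbK : b < K) :
    (-Fa * K + a < -Fb * K + b) ↔ (Fb < Fa ∨ (Fa = Fb ∧ a < b)) := by
  constructor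
  · intro h
    rcases lt_trichotomy Fa Fb with hlt | heq | hgt
    · exfalso
      have h2 : (Fa + 1) * K ≤ Fb * K :=
        mul_le_mul_of_nonneg_right (by omega) (by omega)
      nlinarith
    · subst heq
      exact Or.inr ⟨rfl, by linarith⟩
    · exact Or.inl hgt
  · rintro (h | ⟨heq, hab⟩)
    · have h2 : (Fb + 1) * K ≤ Fa * K :=
        mul_le_mul_of_nonneg_right (by omega) (by omega)
      nlinarith
    · subst heq
      linarith

-- the linearised key is injective inside [0, K)
theorem pvKeyInj (K : Int) (F : Int → Int) (a b : Int) (ha0 : 0 ≤ a) (haK : a < K) (hb0 : 0 ≤ b) (hbK : b < K)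
    (h : -(F a) * K + a = -(F b) * K + b) : a = b := by
  rcases lt_trichotomy (F a) (F b) with hlt | heq | hgt
  · have := (pvLexKey K (F b) (F a) b a hb0 hbK ha0 haK).2 (Or.inl hlt)
    linarith
  · rw [heq] at h; linarith
  · have := (pvLexKey K (F a) (F b) a b ha0 haK hb0 hbK).2 (Or.inl hgt)
    linarith

-- The two ports agree on every input (both model the raising inputs with the same '?' default).
theorem pvPorts_eq (alignment : List String) (N : Int) :
    consensus_N_py alignment N = consensus_N_py_alt alignment N := by
  by_cases hg : alignment = [] ∨ N ≤ 0
  · simp [consensus_N_py, consensus_N_py_alt, hg]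
  · have hN : 0 < N := by
      rcases not_or.1 hg with ⟨_, h2⟩; omega
    simp only [consensus_N_py, consensus_N_py_alt, if_neg hg]
    set K := PySem.Str.len (alignment.headD "") with hKdef
    have hK0 : 0 ≤ K := by
      rw [hKdef, PySem.Str.len_eq]; positivity
    have hfreq : (PySem.List.pyRange 0 K 1).map (fun c => pvFreqB alignment c)
        = (PySem.List.pyRange 0 K 1).map (fun c => pvFreqA alignment c) :=
      List.map_congr_left (fun c _ => pvFreqB_eq alignment c)
    rw [hfreq]
    -- the linearised sort key
    set k : Int → Int := fun d => -(pvFreqA alignment d) * K + d with hkdef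
    have horder : PySem.List.sorted2 (PySem.List.pyRange 0 K 1)
        (fun c => -(PySem.List.pyGetD ((PySem.List.pyRange 0 K 1).map (fun c => pvFreqA alignment c)) c 0))
        (fun c => c)
        = PySem.List.sorted (PySem.List.pyRange 0 K 1) k := by
      apply pvSorted2_eq
      intro a ha b hb
      obtain ⟨ha0, haK⟩ := (PySem.List.mem_pyRange_one).1 ha
      obtain ⟨hb0, hbK⟩ := (PySem.List.mem_pyRange_one).1 hb
      rw [PySem.List.pyGetD_map_pyRange_of_nonneg _ _ _ _ ha0 haK,
          PySem.List.pyGetD_map_pyRange_of_nonneg _ _ _ _ hb0 hbK]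
      rw [Bool.eq_iff_iff]
      simp only [Bool.or_eq_true, Bool.and_eq_true, Bool.not_eq_true', decide_eq_true_eq,
        decide_eq_false_iff_not, hkdef]
      rw [pvLexKey K (pvFreqA alignment a) (pvFreqA alignment b) a b ha0 haK hb0 hbK]
      omega
    have hperm : (PySem.List.sorted (PySem.List.pyRange 0 K 1) k).Perm (PySem.List.pyRange 0 K 1) :=
      PySem.List.sorted_perm _ k false
    have hpw : (PySem.List.sorted (PySem.List.pyRange 0 K 1) k).Pairwise (fun a b => k a < k b) := by
      have h1 := PySem.List.sorted_pairwise (PySem.List.pyRange 0 K 1) k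
      have h2 : (PySem.List.sorted (PySem.List.pyRange 0 K 1) k).Nodup :=
        (hperm.nodup_iff).2 (PySem.List.nodup_pyRange_one 0 K)
      refine List.Pairwise.imp_of_mem ?_ (h1.and h2)
      intro a b hma hmb hab
      obtain ⟨ha0, haK⟩ := (PySem.List.mem_pyRange_one).1 ((PySem.List.mem_sorted _ _ _ a).1 hma)
      obtain ⟨hb0, hbK⟩ := (PySem.List.mem_pyRange_one).1 ((PySem.List.mem_sorted _ _ _ b).1 hmb)
      exact lt_of_le_of_ne hab.1
        (fun he => hab.2 (pvKeyInj K (fun d => pvFreqA alignment d) a b ha0 haK hb0 hbK he))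
    have hlenL : PySem.List.len ((PySem.List.pyRange 0 K 1).map (fun c => pvFreqA alignment c)) = K := by
      simp [PySem.List.len, PySem.List.length_pyRange_one]
      omega
    congr 1
    apply PySem.List.foldl_congr_mem
    intro res c hc
    obtain ⟨hc0, hcK⟩ := (PySem.List.mem_pyRange_one).1 hc
    have hgc : PySem.List.pyGetD ((PySem.List.pyRange 0 K 1).map (fun c => pvFreqA alignment c)) c 0
        = pvFreqA alignment c :=
      PySem.List.pyGetD_map_pyRange_of_nonneg _ _ _ _ hc0 hcK
    have henum : PySem.List.enumerate ((PySem.List.pyRange 0 K 1).map (fun c => pvFreqA alignment c))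
        = (PySem.List.pyRange 0 K 1).map
            (fun j => (j, PySem.List.pyGetD ((PySem.List.pyRange 0 K 1).map (fun c => pvFreqA alignment c)) j 0)) := by
      have h := PySem.List.enumerate_eq_map_pyRange
        ((PySem.List.pyRange 0 K 1).map (fun c => pvFreqA alignment c)) 0
      rw [hlenL] at h
      exact h
    have hrank : (PySem.List.enumerate ((PySem.List.pyRange 0 K 1).map (fun c => pvFreqA alignment c))).foldl
          (fun acc df => acc + (if PySem.List.pyGetD ((PySem.List.pyRange 0 K 1).map (fun c => pvFreqA alignment c)) c 0 < df.2
              ∨ (df.2 = PySem.List.pyGetD ((PySem.List.pyRange 0 K 1).map (fun c => pvFreqA alignment c)) c 0 ∧ df.1 < c)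
              then 1 else 0)) 0
        = (((PySem.List.pyRange 0 K 1).countP
            (fun d => decide (pvFreqA alignment c < pvFreqA alignment d
              ∨ (pvFreqA alignment d = pvFreqA alignment c ∧ d < c)))) : Int) := by
      rw [henum, List.foldl_map]
      rw [PySem.List.foldl_congr_mem _ _
        (fun acc j => if pvFreqA alignment c < pvFreqA alignment j
            ∨ (pvFreqA alignment j = pvFreqA alignment c ∧ j < c) then acc + 1 else acc) 0 ?_]
      · rw [PySem.List.foldl_ite_add_one]
        simp
      · intro acc j hj
        obtain ⟨hj0, hjK⟩ := (PySem.List.mem_pyRange_one).1 hj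
        rw [PySem.List.pyGetD_map_pyRange_of_nonneg _ _ _ _ hj0 hjK, hgc]
        by_cases hp : pvFreqA alignment c < pvFreqA alignment j
            ∨ (pvFreqA alignment j = pvFreqA alignment c ∧ j < c)
        · simp [hp]
        · simp [hp]
    rw [hrank]
    have hcnteq : (PySem.List.sorted (PySem.List.pyRange 0 K 1) k).countP (fun d => decide (k d < k c))
        = (PySem.List.pyRange 0 K 1).countP
            (fun d => decide (pvFreqA alignment c < pvFreqA alignment d
              ∨ (pvFreqA alignment d = pvFreqA alignment c ∧ d < c))) := by
      rw [List.Perm.countP_eq _ hperm]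
      apply List.countP_congr
      intro d hd
      obtain ⟨hd0, hdK⟩ := (PySem.List.mem_pyRange_one).1 hd
      simp only [decide_eq_true_eq, hkdef]
      exact pvLexKey K (pvFreqA alignment d) (pvFreqA alignment c) d c hd0 hdK hc0 hcK
    have hcs : c ∈ PySem.List.sorted (PySem.List.pyRange 0 K 1) k :=
      (PySem.List.mem_sorted _ _ _ c).2 hc
    have hmem : PySem.Set.contains
        (PySem.Set.ofList (PySem.List.slice (PySem.List.sorted2 (PySem.List.pyRange 0 K 1)
          (fun c => -(PySem.List.pyGetD ((PySem.List.pyRange 0 K 1).map (fun c => pvFreqA alignment c)) c 0))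
          (fun c => c)) none (some N))) c = true
        ↔ (((PySem.List.pyRange 0 K 1).countP
            (fun d => decide (pvFreqA alignment c < pvFreqA alignment d
              ∨ (pvFreqA alignment d = pvFreqA alignment c ∧ d < c)))) : Int) < N := by
      rw [horder, PySem.List.slice_to _ (le_of_lt hN), PySem.Set.contains_iff, PySem.Set.mem_ofList]
      rw [pvTakeMem k _ hpw c hcs N.toNat]
      rw [hcnteq]
      omega
    by_cases hr : (((PySem.List.pyRange 0 K 1).countP
        (fun d => decide (pvFreqA alignment c < pvFreqA alignment d
          ∨ (pvFreqA alignment d = pvFreqA alignment c ∧ d < c)))) : Int) < N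
    · rw [if_neg (not_not_intro (hmem.2 hr)), if_pos hr]
      have hcands : (PySem.List.enumerate ['g', 'c', 't', 'a']).map
            (fun ib => (-(pvCntB alignment c ib.2), ib.1, ib.2))
          = [(-(pvCntB alignment c 'g'), 0, 'g'), (-(pvCntB alignment c 'c'), 1, 'c'),
             (-(pvCntB alignment c 't'), 2, 't'), (-(pvCntB alignment c 'a'), 3, 'a')] := by
        norm_num [PySem.List.enumerate_cons, PySem.List.enumerate_nil]
      rw [hcands, pvCntB_eq, pvCntB_eq, pvCntB_eq, pvCntB_eq]
      exact congrArg (fun z => res ++ [z])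
        (pvPick4 (fun b => ((alignment.map (fun s => pvChA s c)).count b : Int)))
    · rw [if_pos (fun hcc => hr (hmem.1 hcc)), if_neg hr]

-- ===== VERDICT (by name: the statement is the Claim_ definition above) =====
theorem consensus_N_py_spec : Claim_equal_consensus_N_py := by
  intro alignment N _ _
  unfold Spec_consensus_N_py
  exact pvPorts_eq alignment N
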